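-- pv_equiv track=rewrite | github.com/Jannxnn/SeedLang-V2 | bench/industry/sources/bench_industry.py | json_tokenize_test
-- ===== SOURCE A (Python) =====
-- def json_tokenize_test(n):
--     json_str = "{"
--     for i in range(10):
--         json_str += '"k' + str(i) + '":' + str(i * 100)
--         if i < 9: json_str += ","
--     json_str += "}"
--     tokens = 0
--     for _ in range(n):
--         i = 0
--         while i < len(json_str):
--             c = json_str[i]
--             if c in "{}:,": tokens += 1
--             if c == '"':
--                 tokens += 1; j = i + 1
--                 while j < len(json_str) and json_str[j] != '"': j += 1
--                 i = j
--             i += 1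
--     return tokens
-- ===== SOURCE B (Python) =====
-- def json_tokenize_test(n):
--     json_str = "{" + ",".join('"k' + str(i) + '":' + str(i * 100) for i in range(10)) + "}"
--     per_scan = (json_str.count('{') + json_str.count('}') + json_str.count(':')
--                 + json_str.count(',') + json_str.count('"') // 2)
--     tokens = 0
--     for _ in range(n):
--         tokens += per_scan
--     return tokens
-- ===== Notes on version B (the rewrite author's own statement) =====
-- stated objective: simpler
-- what changed: Replaces the per-repetition stateful char-by-char scan with quote-skipping by computing the per-scan token count once via aggregate substring counts (count of each of { } : , plus count('"')//2), then accumulating it over the loop.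
import Mathlib
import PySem

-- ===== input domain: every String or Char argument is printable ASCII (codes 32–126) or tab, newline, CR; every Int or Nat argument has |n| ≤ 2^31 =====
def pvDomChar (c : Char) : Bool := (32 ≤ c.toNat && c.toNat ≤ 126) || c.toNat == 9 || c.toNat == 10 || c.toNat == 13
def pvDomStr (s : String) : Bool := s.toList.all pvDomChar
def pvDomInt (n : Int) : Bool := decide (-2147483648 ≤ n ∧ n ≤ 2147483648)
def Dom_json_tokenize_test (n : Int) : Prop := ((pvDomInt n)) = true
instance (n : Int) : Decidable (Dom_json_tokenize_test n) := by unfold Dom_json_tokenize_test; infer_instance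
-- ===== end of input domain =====

-- B computes the per-scan token count once via aggregate substring counts instead of
-- repeating A's stateful char-by-char quote-skipping scan; equivalence is proved for all n.

-- ===== PORT A =====
-- the fixed string built by A's first loop
def pvJsonStrA : List Char :=
  ((PySem.List.pyRange 0 10 1).foldl
    (fun s i =>
      let s := s ++ ("\"k".toList ++ (PySem.Int.toStr i).toList ++ "\":".toList
                      ++ (PySem.Int.toStr (i * 100)).toList)
      if i < 9 then s ++ [','] else s)
    ['{']) ++ ['}']

-- inner while: j advances past non-quote chars (fuel = remaining length, strictly decreasing)
def pvSkipQuote (s : List Char) : Nat → Nat → Nat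
  | 0, j => j
  | fuel + 1, j =>
      if j < s.length ∧ s.getD j ' ' ≠ '"' then pvSkipQuote s fuel (j + 1) else j

-- outer while over i with the per-character token updates, fuel-guarded exactly like the index loop
def pvScanA (s : List Char) : Nat → Nat → Int → Int
  | 0, _, tokens => tokens
  | fuel + 1, i, tokens =>
      if i < s.length then
        let c := s.getD i ' '
        let tokens := if c = '{' ∨ c = '}' ∨ c = ':' ∨ c = ',' then tokens + 1 else tokens
        if c = '"' then
          let tokens := tokens + 1
          let j := pvSkipQuote s s.length (i + 1)
          pvScanA s fuel (j + 1) tokens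
        else pvScanA s fuel (i + 1) tokens
      else tokens

def json_tokenize_test (n : Int) : Int :=
  let s := pvJsonStrA
  (PySem.List.pyRange 0 n 1).foldl (fun tokens _ => pvScanA s s.length 0 tokens) 0

-- ===== PORT B =====
def pvJsonStrB : List Char :=
  '{' :: PySem.Chars.join [','] ((PySem.List.pyRange 0 10 1).map
    (fun i => "\"k".toList ++ (PySem.Int.toStr i).toList ++ "\":".toList
              ++ (PySem.Int.toStr (i * 100)).toList)) ++ ['}']

def pvPerScanB : Int :=
  let s := pvJsonStrB
  (PySem.Chars.count s ['{'] : Int) + (PySem.Chars.count s ['}'] : Int)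
    + (PySem.Chars.count s [':'] : Int) + (PySem.Chars.count s [','] : Int)
    + PySem.Int.floordiv (PySem.Chars.count s ['"'] : Int) 2

def json_tokenize_test_alt (n : Int) : Int :=
  let per := pvPerScanB
  (PySem.List.pyRange 0 n 1).foldl (fun tokens _ => tokens + per) 0

-- ===== PRECONDITION & SPEC =====
def Spec_json_tokenize_test (n : Int) (out : Int) : Prop := out = json_tokenize_test_alt n
instance (n : Int) (out : Int) : Decidable (Spec_json_tokenize_test n out) := by unfold Spec_json_tokenize_test; infer_instance

-- ===== CLAIM (what is proved, stated in full; the proofs are below) =====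
def Claim_equal_json_tokenize_test : Prop := ∀ (n : Int), Dom_json_tokenize_test n → Spec_json_tokenize_test n (json_tokenize_test n)

-- ===== LEMMAS AND PROOFS =====
-- A's scan adds its count on top of any starting accumulator
theorem pvScanA_add (s : List Char) (fuel i : Nat) (t : Int) :
    pvScanA s fuel i t = t + pvScanA s fuel i 0 := by
  induction fuel generalizing i t with
  | zero => simp [pvScanA]
  | succ fuel ih =>
    simp only [pvScanA]
    split_ifs with h1 h2 h3
    all_goals (try rw [ih])
    all_goals (try (conv_rhs => rw [ih]))
    all_goals ring

set_option maxRecDepth 1000000 in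
theorem pvScanA_base : pvScanA pvJsonStrA pvJsonStrA.length 0 0 = 31 := by decide

set_option maxRecDepth 1000000 in
theorem pvPerScanB_eq : pvPerScanB = 31 := by decide

theorem pvFold_eq (l : List Int) (t : Int) :
    l.foldl (fun tokens _ => pvScanA pvJsonStrA pvJsonStrA.length 0 tokens) t
      = l.foldl (fun tokens _ => tokens + 31) t := by
  induction l generalizing t with
  | nil => rw [List.foldl_nil, List.foldl_nil]
  | cons a l ih => simp only [List.foldl]; rw [pvScanA_add, pvScanA_base]; exact ih _

-- ===== VERDICT (by name: the statement is the Claim_ definition above) =====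
theorem json_tokenize_test_spec : Claim_equal_json_tokenize_test := by
  intro n _
  unfold Spec_json_tokenize_test json_tokenize_test json_tokenize_test_alt
  simp only [pvPerScanB_eq]
  exact pvFold_eq _ _
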